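-- pv_equiv track=rewrite | github.com/DeShrike/AdventOfCode2018 | python/day7.py | FindNextToExecute
-- ===== SOURCE A (Python) =====
-- def FindNextToExecute(todo, completed, steps):
--     for i in range(len(todo)):
--         step = todo[i]
--         available = True
--         for s in steps:
--             if s[1] == step:
--                 if s[0] not in completed:
--                     available = False
--                     break
--         if available:
--             return step
--
--     return None
-- ===== SOURCE B (Python) =====
-- def FindNextToExecute(todo, completed, steps):
--     done = set(completed)
--     blocked = set()
--     for s in steps:
--         if s[0] not in done:
--             blocked.add(s[1])
--     for step in todo:
--         if step not in blocked:
--             return step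
--     return None
-- ===== Notes on version B (the rewrite author's own statement) =====
-- stated objective: alternative
-- what changed: Replaces A's per-candidate inner scan over steps with two single passes: one pass precomputing a 'blocked' set of steps that have an uncompleted prerequisite, then one membership pass over todo returning the first unblocked step.
import Mathlib
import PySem

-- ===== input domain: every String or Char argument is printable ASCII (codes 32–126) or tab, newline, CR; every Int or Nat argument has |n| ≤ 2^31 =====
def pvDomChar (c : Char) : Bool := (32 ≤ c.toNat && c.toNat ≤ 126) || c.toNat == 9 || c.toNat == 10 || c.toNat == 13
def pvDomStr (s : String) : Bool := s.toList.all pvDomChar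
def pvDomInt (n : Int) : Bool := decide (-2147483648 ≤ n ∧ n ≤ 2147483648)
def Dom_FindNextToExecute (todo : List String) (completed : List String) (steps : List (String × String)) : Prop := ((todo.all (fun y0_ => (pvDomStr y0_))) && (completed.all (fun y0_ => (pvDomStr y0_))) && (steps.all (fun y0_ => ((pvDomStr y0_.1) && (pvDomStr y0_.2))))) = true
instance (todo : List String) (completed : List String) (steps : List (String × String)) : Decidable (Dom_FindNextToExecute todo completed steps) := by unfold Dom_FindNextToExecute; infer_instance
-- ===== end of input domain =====

-- B replaces A's per-candidate inner scan over steps by one pass precomputing a 'blocked' set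
-- plus one membership pass over todo (alternative algorithm, same return value).

-- ===== PORT A =====
-- inner loop of A: 'for s in steps: if s[1]==step: if s[0] not in completed: available=False; break'
def pvAvail (steps : List (String × String)) (completed : List String) (step : String) : Bool :=
  match steps with
  | [] => true
  | s :: rest =>
    if s.2 == step then
      if !(completed.contains s.1) then false
      else pvAvail rest completed step
    else pvAvail rest completed step

def FindNextToExecute (todo : List String) (completed : List String) (steps : List (String × String)) : Option String :=
  match todo with
  | [] => none
  | step :: rest =>
    if pvAvail steps completed step then some step
    else FindNextToExecute rest completed steps

-- ===== PORT B =====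
-- B: one pass building the 'blocked' set, then the first todo element not in it
def pvBlocked (steps : List (String × String)) (done : PySem.Set String) : PySem.Set String :=
  steps.foldl (fun acc s => if !(PySem.Set.contains done s.1) then PySem.Set.add acc s.2 else acc) PySem.Set.empty

def FindNextToExecute_alt (todo : List String) (completed : List String) (steps : List (String × String)) : Option String :=
  let done := PySem.Set.ofList completed
  let blocked := pvBlocked steps done
  todo.find? (fun step => !(PySem.Set.contains blocked step))

-- ===== PRECONDITION & SPEC =====
def Spec_FindNextToExecute (todo : List String) (completed : List String) (steps : List (String × String)) (out : Option String) : Prop := out = FindNextToExecute_alt todo completed steps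
instance (todo : List String) (completed : List String) (steps : List (String × String)) (out : Option String) : Decidable (Spec_FindNextToExecute todo completed steps out) := by unfold Spec_FindNextToExecute; infer_instance

-- ===== CLAIM (what is proved, stated in full; the proofs are below) =====
def Claim_equal_FindNextToExecute : Prop := ∀ (todo : List String) (completed : List String) (steps : List (String × String)), Dom_FindNextToExecute todo completed steps → Spec_FindNextToExecute todo completed steps (FindNextToExecute todo completed steps)

-- ===== LEMMAS AND PROOFS =====
-- membership in the foldl-built set, generalized over the accumulator
theorem pvBlocked_mem (steps : List (String × String)) (done : PySem.Set String) (t : String)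
    (acc : PySem.Set String) :
    ((steps.foldl (fun acc s => if !(PySem.Set.contains done s.1) then PySem.Set.add acc s.2 else acc) acc).contains t)
    = (acc.contains t || steps.any (fun s => s.2 == t && !(PySem.Set.contains done s.1))) := by
  induction steps generalizing acc with
  | nil => simp [PySem.Set.contains]
  | cons s rest ih =>
    simp only [List.foldl_cons, List.any_cons, ih]
    by_cases h : s.1 ∈ done
    · simp [h]
    · by_cases ht : s.2 = t
      · subst ht
        simp [h, PySem.Set.add, PySem.Set.contains]
        by_cases hm : s.2 ∈ acc <;> simp [hm]
      · have hb : (s.2 == t) = false := beq_eq_false_iff_ne.mpr ht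
        simp [h, hb, PySem.Set.add, PySem.Set.contains]
        by_cases hm : s.2 ∈ acc <;> simp [hm, Ne.symm ht]

theorem pvAvail_eq_not_blocked (steps : List (String × String)) (completed : List String) (t : String) :
    pvAvail steps completed t = !((pvBlocked steps (PySem.Set.ofList completed)).contains t) := by
  rw [pvBlocked, pvBlocked_mem]
  induction steps with
  | nil => simp [pvAvail, PySem.Set.empty, PySem.Set.contains]
  | cons s rest ih =>
    simp only [pvAvail, List.any_cons]
    by_cases h1 : s.2 = t
    · by_cases h2 : s.1 ∈ completed <;>
        simp [h1, h2, ih, PySem.Set.empty, PySem.Set.contains, PySem.Set.mem_ofList]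
    · simp [h1, ih, PySem.Set.empty, PySem.Set.contains]

-- ===== VERDICT (by name: the statement is the Claim_ definition above) =====
theorem FindNextToExecute_spec : Claim_equal_FindNextToExecute := by
  intro todo completed steps hd
  clear hd
  unfold Spec_FindNextToExecute FindNextToExecute_alt
  induction todo with
  | nil => simp [FindNextToExecute]
  | cons step rest ih =>
    simp only [FindNextToExecute, List.find?]
    rw [pvAvail_eq_not_blocked]
    by_cases h : step ∈ pvBlocked steps (PySem.Set.ofList completed)
    · simpa [h, PySem.Set.contains] using ih
    · simp [h, PySem.Set.contains]
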